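-- pv_equiv track=rewrite | github.com/BarysCh/TMSQAP14_Charniatsou | homework#4-8.py | calculate
-- ===== SOURCE A (Python) =====
-- def calculate(x):
--     """multiplies all positive numbers, finds the sum and quantity of all negative numbers"""
--     result1 = 1
--     result2 = 0
--     result3 = 0
--     for i in x:
--         if i > 0:
--             result1 = result1 * i
--         if i < 0:
--             result2 += i
--             result3 += 1
--     return result1, result2, result3
-- ===== SOURCE B (Python) =====
-- def calculate(x):
--     """multiplies all positive numbers, finds the sum and quantity of all negative numbers"""
--     if len(x) <= 1:
--         if not x:
--             return 1, 0, 0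
--         v = x[0]
--         return (v if v > 0 else 1), (v if v < 0 else 0), (1 if v < 0 else 0)
--     mid = len(x) // 2
--     p1, s1, c1 = calculate(x[:mid])
--     p2, s2, c2 = calculate(x[mid:])
--     return p1 * p2, s1 + s2, c1 + c2
-- ===== Notes on version B (the rewrite author's own statement) =====
-- stated objective: alternative
-- what changed: Replaces the single left-to-right branched accumulator loop with a balanced divide-and-conquer recursion: split the list at the midpoint, recurse on both halves, and merge the (product, sum, count) triples componentwise.
import Mathlib
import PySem

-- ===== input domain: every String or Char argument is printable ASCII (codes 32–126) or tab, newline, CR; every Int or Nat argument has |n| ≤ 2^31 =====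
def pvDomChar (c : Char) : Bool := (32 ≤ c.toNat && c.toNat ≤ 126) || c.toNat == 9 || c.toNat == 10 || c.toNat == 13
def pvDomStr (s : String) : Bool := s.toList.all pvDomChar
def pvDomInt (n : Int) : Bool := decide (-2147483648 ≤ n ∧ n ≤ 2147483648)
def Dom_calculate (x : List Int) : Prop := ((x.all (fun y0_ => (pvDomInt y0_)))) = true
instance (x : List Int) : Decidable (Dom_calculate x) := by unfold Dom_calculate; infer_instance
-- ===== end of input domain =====

-- B replaces A's single branched accumulator loop with a balanced divide-and-conquer recursion merging (product, sum, count) triples; same result, different algorithmic structure (no speed claim).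


-- ===== PORT A =====
def calculate (x : List Int) : Int × Int × Int :=
  x.foldl (fun (st : Int × Int × Int) i =>
    let st1 := if i > 0 then (st.1 * i, st.2.1, st.2.2) else st
    if i < 0 then (st1.1, st1.2.1 + i, st1.2.2 + 1) else st1) (1, 0, 0)

-- ===== PORT B =====
def calculate_alt (x : List Int) : Int × Int × Int :=
  if x.length ≤ 1 then
    match x with
    | [] => (1, 0, 0)
    | v :: _ => (if v > 0 then v else 1, if v < 0 then v else 0, if v < 0 then 1 else 0)
  else
    let mid := x.length / 2
    let r1 := calculate_alt (x.take mid)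
    let r2 := calculate_alt (x.drop mid)
    (r1.1 * r2.1, r1.2.1 + r2.2.1, r1.2.2 + r2.2.2)
termination_by x.length
decreasing_by
  · simp only [List.length_take]
    omega
  · simp only [List.length_drop]
    omega

-- ===== PRECONDITION & SPEC =====
def Spec_calculate (x : List Int) (out : Int × Int × Int) : Prop := out = calculate_alt x
instance (x : List Int) (out : Int × Int × Int) : Decidable (Spec_calculate x out) := by unfold Spec_calculate; infer_instance

-- ===== CLAIM (what is proved, stated in full; the proofs are below) =====
def Claim_equal_calculate : Prop := ∀ (x : List Int), Dom_calculate x → Spec_calculate x (calculate x)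

-- ===== LEMMAS AND PROOFS =====

-- A's loop with general initial state equals the filter-based closed form.
theorem calc_general (x : List Int) (a b : Int) (c : Int) :
    x.foldl (fun (st : Int × Int × Int) i =>
      let st1 := if i > 0 then (st.1 * i, st.2.1, st.2.2) else st
      if i < 0 then (st1.1, st1.2.1 + i, st1.2.2 + 1) else st1) (a, b, c)
    = (a * (x.filter (fun v => v > 0)).prod,
       b + (x.filter (fun v => v < 0)).sum,
       c + ((x.filter (fun v => v < 0)).length : Int)) := by
  induction x generalizing a b c with
  | nil => simp
  | cons h t ih =>
    rw [List.foldl_cons]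
    rcases lt_trichotomy h 0 with hlt | heq | hgt
    · have h1 : ¬ h > 0 := by omega
      have hstep : (let st1 := if (h : Int) > 0 then (((a, b, c) : Int × Int × Int).1 * h, ((a, b, c) : Int × Int × Int).2.1, ((a, b, c) : Int × Int × Int).2.2) else ((a, b, c) : Int × Int × Int);
          if (h : Int) < 0 then (st1.1, st1.2.1 + h, st1.2.2 + 1) else st1) = ((a, b + h, c + 1) : Int × Int × Int) := by simp [hlt, h1]
      rw [hstep, ih]
      simp [hlt, h1]
      omega
    · subst heq
      have hstep : (let st1 := if (0 : Int) > 0 then (((a, b, c) : Int × Int × Int).1 * 0, ((a, b, c) : Int × Int × Int).2.1, ((a, b, c) : Int × Int × Int).2.2) else ((a, b, c) : Int × Int × Int);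
          if (0 : Int) < 0 then (st1.1, st1.2.1 + 0, st1.2.2 + 1) else st1) = ((a, b, c) : Int × Int × Int) := by simp
      rw [hstep, ih, List.filter_cons, List.filter_cons]
      simp
    · have h1 : ¬ h < 0 := by omega
      have hstep : (let st1 := if (h : Int) > 0 then (((a, b, c) : Int × Int × Int).1 * h, ((a, b, c) : Int × Int × Int).2.1, ((a, b, c) : Int × Int × Int).2.2) else ((a, b, c) : Int × Int × Int);
          if (h : Int) < 0 then (st1.1, st1.2.1 + h, st1.2.2 + 1) else st1) = ((a * h, b, c) : Int × Int × Int) := by simp [hgt, h1]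
      rw [hstep, ih]
      simp [hgt, h1, mul_assoc]

-- B's divide-and-conquer equals the same filter-based closed form.
theorem alt_closed_aux (n : Nat) : ∀ (x : List Int), x.length = n →
    calculate_alt x
    = ((x.filter (fun v => v > 0)).prod,
       (x.filter (fun v => v < 0)).sum,
       ((x.filter (fun v => v < 0)).length : Int)) := by
  induction n using Nat.strong_induction_on with
  | _ n ih =>
    intro x hn
    rw [calculate_alt.eq_def]
    by_cases hle : x.length ≤ 1
    · simp only [hle, if_true]
      match x, hle with
      | [], _ => simp
      | [v], _ =>
        simp only [List.filter_cons, List.filter_nil]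
        by_cases h1 : (0:Int) < v <;> by_cases h2 : v < (0:Int) <;> simp [h1, h2]
    · simp only [hle, if_false]
      have h2 : 2 ≤ x.length := by omega
      have htl : (x.take (x.length / 2)).length < n := by
        simp only [List.length_take]; omega
      have hdl : (x.drop (x.length / 2)).length < n := by
        simp only [List.length_drop]; omega
      rw [ih _ htl _ rfl, ih _ hdl _ rfl]
      have hsplit : x.take (x.length / 2) ++ x.drop (x.length / 2) = x := List.take_append_drop _ _
      conv_rhs => rw [← hsplit]
      simp only [List.filter_append, List.prod_append, List.sum_append,
        List.length_append, Nat.cast_add]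

theorem alt_closed (x : List Int) :
    calculate_alt x
    = ((x.filter (fun v => v > 0)).prod,
       (x.filter (fun v => v < 0)).sum,
       ((x.filter (fun v => v < 0)).length : Int)) :=
  alt_closed_aux x.length x rfl

-- ===== VERDICT (by name: the statement is the Claim_ definition above) =====
theorem calculate_spec : Claim_equal_calculate := by
  intro x _
  unfold Spec_calculate calculate
  rw [alt_closed, calc_general]
  simp
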